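-- pv_equiv track=rewrite | github.com/byukbyak/Python-Coding-Test-Practice | 2206/26/기능개발.py | solution
-- ===== SOURCE A (Python) =====
-- import math
-- import math
--
-- def solution(progresses, speeds):
--     answer = []
--     # 1. 잔여일수로 데이터 초기화
--     progresses = [math.ceil((100-a)/b) for a, b in zip(progresses, speeds)]
--     # 2. front 체크
--     front = 0
--     # 3. 맨 왼쪽부터 체크
--     for i in range(len(progresses)):
--         # 4. 현재 인덱스 값이 front 보다 크다면
--         if progresses[i] > progresses[front]:
--             # 5. answer 에 (현재 인덱스 - 맨 앞 인덱스)
--             answer.append(i - front)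
--             # 6. front 값 현재로 초기화
--             front = i
--     # 7. 맨 마지막까지 확인 (전체 길이 - 현재 인덱스)
--     answer.append(len(progresses) - front)
--
--     return answer
-- ===== SOURCE B (Python) =====
-- import math
--
-- def solution(progresses, speeds):
--     days = [math.ceil((100 - p) / s) for p, s in zip(progresses, speeds)]
--     # pass 1: prefix maxima of the remaining-days list
--     peaks = []
--     for d in days:
--         peaks.append(d if not peaks or d > peaks[-1] else peaks[-1])
--     # pass 2: group = run of equal prefix maxima; distinct maxima are strictly
--     # increasing, so tallying each peak value in an insertion-ordered dict
--     # yields the group sizes in order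
--     counts = {}
--     for m in peaks:
--         counts[m] = counts.get(m, 0) + 1
--     return list(counts.values())
-- ===== Notes on version B (the rewrite author's own statement) =====
-- stated objective: alternative
-- what changed: B replaces A's fused index scan carrying (answer, front-index) with value-based grouping: build the prefix-maxima list, then tally each peak value in an insertion-ordered dict, whose values are the group sizes; no index arithmetic remains.
-- outside the precondition, e.g. on solution([], []): A returns [0], B returns []
import Mathlib
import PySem

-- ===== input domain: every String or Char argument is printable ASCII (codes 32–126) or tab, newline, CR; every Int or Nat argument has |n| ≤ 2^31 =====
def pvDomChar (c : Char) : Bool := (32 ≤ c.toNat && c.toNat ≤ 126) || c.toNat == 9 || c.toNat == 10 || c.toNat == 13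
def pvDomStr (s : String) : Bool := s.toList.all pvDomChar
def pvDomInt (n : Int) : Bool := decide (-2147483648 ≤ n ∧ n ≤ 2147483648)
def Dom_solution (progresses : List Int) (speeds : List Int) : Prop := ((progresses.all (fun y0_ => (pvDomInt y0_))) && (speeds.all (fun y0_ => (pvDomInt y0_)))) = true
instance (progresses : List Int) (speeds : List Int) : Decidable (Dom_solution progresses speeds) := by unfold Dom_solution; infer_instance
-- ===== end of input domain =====

-- B regroups by value instead of by index: prefix-maxima list, then tally each peak
-- value in an insertion-ordered dict (alternative decomposition, same cost).

-- ===== PORT A =====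
-- math.ceil((100-a)/b): on Dom |100-a| ≤ 2^31+100 and |b| ≤ 2^31, so the correctly
-- rounded float quotient never crosses an integer; the ceiling is exactly -((-(100-a)) // b).
def pvCeilDiv (a b : Int) : Int := -(PySem.Int.floordiv (-a) b)

def solution (progresses : List Int) (speeds : List Int) : List Int :=
  let days := (progresses.zip speeds).map (fun ab => pvCeilDiv (100 - ab.1) ab.2)
  let st := (PySem.List.pyRange 0 (days.length : Int) 1).foldl
    (fun (st : List Int × Int) i =>
      if PySem.List.pyGetD days i 0 > PySem.List.pyGetD days st.2 0
      then (st.1 ++ [i - st.2], i) else st)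
    ([], 0)
  st.1 ++ [(days.length : Int) - st.2]

-- ===== PORT B =====
def solution_alt (progresses : List Int) (speeds : List Int) : List Int :=
  let days := (progresses.zip speeds).map (fun ab => pvCeilDiv (100 - ab.1) ab.2)
  let peaks := days.foldl
    (fun (pk : List Int) d =>
      pk ++ [if pk = [] ∨ PySem.List.pyGetD pk (-1) 0 < d then d
             else PySem.List.pyGetD pk (-1) 0])
    []
  let counts := peaks.foldl
    (fun (c : PySem.Dict Int Int) m => c.insert m (c.getD m 0 + 1)) PySem.Dict.empty
  counts.values

-- ===== PRECONDITION & SPEC =====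
-- Pre_ excludes (a) inputs with a zero speed among the zipped pairs, where A raises
-- ZeroDivisionError, and (b) inputs whose zipped list is empty (either list empty), a
-- degenerate corner where A's trailing append yields the conventional [0] while B's
-- value-grouping naturally yields [] — both defensible for "no tasks".
def Pre_solution (progresses : List Int) (speeds : List Int) : Prop :=
  progresses ≠ [] ∧ speeds ≠ [] ∧ ∀ s ∈ speeds.take progresses.length, s ≠ 0
instance (progresses : List Int) (speeds : List Int) : Decidable (Pre_solution progresses speeds) := by unfold Pre_solution; infer_instance
def pvWitness_solution : List Int × List Int := ([93, 30, 55], [1, 30, 5])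

def Spec_solution (progresses : List Int) (speeds : List Int) (out : List Int) : Prop := out = solution_alt progresses speeds
instance (progresses : List Int) (speeds : List Int) (out : List Int) : Decidable (Spec_solution progresses speeds out) := by unfold Spec_solution; infer_instance

-- ===== CLAIM (what is proved, stated in full; the proofs are below) =====
def Claim_equal_solution : Prop := ∀ (progresses : List Int) (speeds : List Int), Dom_solution progresses speeds → Pre_solution progresses speeds → Spec_solution progresses speeds (solution progresses speeds)

-- ===== LEMMAS AND PROOFS =====

-- canonical group sizes: current group's peak m, current group's size c, rest of days
def pvGr (m c : Int) (rest : List Int) : List Int :=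
  match rest with
  | [] => [c]
  | d :: t => if m < d then c :: pvGr d 1 t else pvGr m (c + 1) t

-- prefix maxima of t continuing from running maximum m
def pvPM (m : Int) (t : List Int) : List Int :=
  match t with
  | [] => []
  | d :: t' => (if m < d then d else m) :: pvPM (if m < d then d else m) t'

theorem pvPM_ge (t : List Int) (m : Int) : ∀ e ∈ pvPM m t, m ≤ e := by
  induction t generalizing m with
  | nil => intro e he; simp [pvPM] at he
  | cons d t' ih =>
    intro e he
    simp only [pvPM, List.mem_cons] at he
    rcases he with h | h
    · subst h; split <;> omega
    · have := ih _ e h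
      split at this <;> omega

-- A's loop from state (ans, front = f), about to scan index j, computes pvGr
theorem lemA (days : List Int) : ∀ (k : Nat) (j f : Int) (ans : List Int),
    0 ≤ f → f < j → j ≤ (days.length : Int) → (days.length : Int) - j = k →
    (let r := (PySem.List.pyRange j (days.length : Int) 1).foldl
        (fun (st : List Int × Int) i =>
          if PySem.List.pyGetD days i 0 > PySem.List.pyGetD days st.2 0
          then (st.1 ++ [i - st.2], i) else st) (ans, f)
     r.1 ++ [(days.length : Int) - r.2])
    = ans ++ pvGr (PySem.List.pyGetD days f 0) (j - f) (days.drop j.toNat) := by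
  intro k
  induction k with
  | zero =>
    intro j f ans h0 h1 h2 h3
    have hj : j = (days.length : Int) := by omega
    rw [PySem.List.pyRange_one_eq_nil (by omega)]
    have hd : days.drop j.toNat = [] := by
      apply List.drop_eq_nil_of_le; omega
    simp [pvGr, hj]
  | succ k ih =>
    intro j f ans h0 h1 h2 h3
    have hjn : j < (days.length : Int) := by omega
    rw [PySem.List.pyRange_one_cons hjn]
    simp only [List.foldl_cons]
    have hjnat : j.toNat < days.length := by omega
    have hdrop : days.drop j.toNat = days[j.toNat] :: days.drop (j.toNat + 1) :=
      List.drop_eq_getElem_cons hjnat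
    have hgj : PySem.List.pyGetD days j 0 = days[j.toNat] :=
      PySem.List.pyGetD_eq_getElem (i := j) days 0 (by omega) (by omega)
    have htn : (j + 1).toNat = j.toNat + 1 := by omega
    by_cases hc : PySem.List.pyGetD days j 0 > PySem.List.pyGetD days f 0
    · rw [if_pos hc]
      rw [ih (j+1) j (ans ++ [j - f]) (by omega) (by omega) (by omega) (by omega)]
      rw [hdrop]
      simp only [pvGr]
      rw [if_pos (by rw [← hgj]; exact hc)]
      simp only [htn, hgj]
      simp
    · rw [if_neg hc]
      rw [ih (j+1) f ans (by omega) (by omega) (by omega) (by omega)]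
      rw [hdrop]
      simp only [pvGr]
      rw [if_neg (by rw [← hgj]; exact hc)]
      have : j + 1 - f = j - f + 1 := by omega
      rw [htn, this]

-- B's first loop extends a nonempty accumulator by the prefix maxima of the rest
theorem lemPk (t : List Int) : ∀ (acc : List Int) (h : acc ≠ []),
    t.foldl (fun (pk : List Int) d =>
      pk ++ [if pk = [] ∨ PySem.List.pyGetD pk (-1) 0 < d then d
             else PySem.List.pyGetD pk (-1) 0]) acc
    = acc ++ pvPM (acc.getLast h) t := by
  induction t with
  | nil => intro acc h; simp [pvPM]
  | cons d t' ih =>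
    intro acc h
    simp only [List.foldl_cons]
    rw [PySem.List.pyGetD_neg_one (xs := acc) (d := (0:Int)) h]
    have hne : ¬ acc = [] := h
    by_cases hc : acc.getLast h < d
    · rw [if_pos (Or.inr hc)]
      rw [ih (acc ++ [d]) (by simp)]
      simp [pvPM, hc]
    · rw [if_neg (by simp [hne, hc])]
      rw [ih (acc ++ [acc.getLast h]) (by simp)]
      simp [pvPM, hc]

theorem discard_not_mem (s : List Int) (m : Int) (hm : m ∉ s) : PySem.Set.discard s m = s := by
  simp only [PySem.Set.discard]
  apply List.filter_eq_self.mpr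
  intro a ha
  simp only [Bool.not_eq_eq_eq_not, Bool.not_true, beq_eq_false_iff_ne, ne_eq]
  exact fun h => hm (h ▸ ha)

theorem lemSet (l : List Int) (m : Int) (c : Nat) (hc : 0 < c) (hm : m ∉ l) :
    PySem.Set.ofList (List.replicate c m ++ l) = m :: PySem.Set.ofList l := by
  induction c with
  | zero => omega
  | succ c ih =>
    rw [List.replicate_succ, List.cons_append, PySem.Set.ofList_cons]
    rcases Nat.eq_zero_or_pos c with h | h
    · subst h
      simp only [List.replicate, List.nil_append]
      rw [discard_not_mem _ _ (by simp [PySem.Set.mem_ofList, hm])]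
    · rw [ih h]
      simp only [PySem.Set.discard, List.filter_cons]
      simp only [beq_self_eq_true, Bool.not_true]
      have : PySem.Set.discard (PySem.Set.ofList l) m = PySem.Set.ofList l :=
        discard_not_mem _ _ (by simp [PySem.Set.mem_ofList, hm])
      simpa [PySem.Set.discard] using this

-- B's tally of c copies of the running max m followed by the prefix maxima of t is pvGr
theorem lemB (t : List Int) : ∀ (m : Int) (c : Nat), 0 < c →
    (PySem.Set.ofList (List.replicate c m ++ pvPM m t)).map
      (fun k => ((List.replicate c m ++ pvPM m t).count k : Int))
    = pvGr m (c : Int) t := by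
  induction t with
  | nil =>
    intro m c hc
    simp only [pvPM, List.append_nil, pvGr]
    have h1 := lemSet [] m c hc (by simp)
    simp only [List.append_nil, PySem.Set.ofList_nil] at h1
    rw [h1, List.map_cons, List.map_nil, List.count_replicate_self]
  | cons d t' ih =>
    intro m c hc
    by_cases hd : m < d
    · simp only [pvPM, if_pos hd, pvGr]
      have hge := pvPM_ge t' d
      have hnm : m ∉ d :: pvPM d t' := by
        intro h
        rcases List.mem_cons.mp h with h | h
        · omega
        · have := hge m h; omega
      rw [lemSet _ _ _ hc hnm, List.map_cons]
      have hcm : ((List.replicate c m ++ (d :: pvPM d t')).count m : Int) = (c : Int) := by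
        rw [List.count_append, List.count_replicate_self, List.count_eq_zero_of_not_mem hnm]
        simp
      rw [hcm]
      have hmapeq : (PySem.Set.ofList (d :: pvPM d t')).map
            (fun k => ((List.replicate c m ++ (d :: pvPM d t')).count k : Int))
          = (PySem.Set.ofList (d :: pvPM d t')).map
            (fun k => (((d :: pvPM d t').count k : Nat) : Int)) := by
        apply List.map_congr_left
        intro k hk
        have hkmem : k ∈ d :: pvPM d t' := (PySem.Set.mem_ofList _ _).mp hk
        have hkm : k ≠ m := by
          rcases List.mem_cons.mp hkmem with h | h
          · omega
          · have := hge k h; omega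
        rw [List.count_append, List.count_replicate]
        have : (m == k) = false := by simpa using Ne.symm hkm
        simp [this]
      rw [hmapeq]
      have := ih d 1 (by omega)
      simpa using this
    · simp only [pvPM, if_neg hd, pvGr]
      have : List.replicate c m ++ (m :: pvPM m t') = List.replicate (c+1) m ++ pvPM m t' := by
        rw [List.replicate_succ']
        simp
      rw [this]
      have h2 := ih m (c+1) (by omega)
      push_cast at h2 ⊢
      exact h2

theorem main_eq (progresses speeds : List Int)
    (h1 : progresses ≠ []) (h2 : speeds ≠ []) :
    solution progresses speeds = solution_alt progresses speeds := by
  unfold solution solution_alt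
  dsimp only
  set days := (progresses.zip speeds).map (fun ab => pvCeilDiv (100 - ab.1) ab.2) with hd
  have hne : days ≠ [] := by
    simp only [hd, ne_eq, List.map_eq_nil_iff, List.zip_eq_nil_iff]
    exact fun h => h.elim h1 h2
  obtain ⟨d, t, hdt⟩ := List.exists_cons_of_ne_nil hne
  have hlen : (0 : Int) < (days.length : Int) := by
    have := List.length_pos_iff.mpr hne; omega
  -- A side reduces to pvGr
  rw [PySem.List.pyRange_one_cons hlen]
  simp only [List.foldl_cons]
  rw [if_neg (lt_irrefl _)]
  have hA := lemA days ((days.length : Int) - 1).toNat 1 0 [] (by omega) (by omega)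
    (by omega) (by omega)
  simp only at hA
  simp only [zero_add]
  rw [hA]
  -- B side reduces to pvGr
  have hBfold : days.foldl
      (fun (pk : List Int) d =>
        pk ++ [if pk = [] ∨ PySem.List.pyGetD pk (-1) 0 < d then d
               else PySem.List.pyGetD pk (-1) 0]) []
      = d :: pvPM d t := by
    rw [hdt, List.foldl_cons]
    rw [if_pos (Or.inl rfl)]
    simpa using lemPk t [d] (by simp)
  rw [hBfold]
  rw [PySem.Dict.foldl_insert_getD_add_one_eq_counter]
  have hvals : (PySem.Dict.counter (d :: pvPM d t)).values
      = (PySem.Set.ofList (d :: pvPM d t)).map (fun k => ((d :: pvPM d t).count k : Int)) := by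
    simp only [PySem.Dict.values, PySem.Dict.items_counter, List.map_map]
    rfl
  rw [hvals]
  have hB := lemB t d 1 (by omega)
  simp only [List.replicate_one, List.singleton_append] at hB
  rw [hB]
  rw [hdt]
  simp [PySem.List.pyGetD_zero_cons]

-- ===== VERDICT (by name: the statement is the Claim_ definition above) =====
theorem solution_spec : Claim_equal_solution := by
  intro progresses speeds _ hpre
  exact main_eq progresses speeds hpre.1 hpre.2.1
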